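-- pv_equiv track=rewrite | github.com/Paul-Emmanuel-Buffe/miel-abeilles | genealogy.py | organize_by_generation
-- ===== SOURCE A (Python) =====
-- def organize_by_generation(ancestors):
--     """
--     Organise les ancêtres par génération
--
--     Args:
--         ancestors (dict): Dictionnaire des ancêtres
--
--     Returns:
--         dict: Dictionnaire {génération: [liste d'IDs]}
--     """
--     generations = {}
--     for bee_id_key, info in ancestors.items():
--         gen = info['generation']
--         if gen not in generations:
--             generations[gen] = []
--         generations[gen].append(bee_id_key)
--     return generations
-- ===== SOURCE B (Python) =====
-- def organize_by_generation(ancestors):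
--     """Alternative decomposition: collect distinct generations in first-seen order,
--     then build each generation's id list by a filtering pass."""
--     gens = list(dict.fromkeys(info['generation'] for info in ancestors.values()))
--     return {g: [bee_id for bee_id, info in ancestors.items() if info['generation'] == g]
--             for g in gens}
-- ===== Notes on version B (the rewrite author's own statement) =====
-- stated objective: alternative
-- what changed: A buckets ids into a dict in a single pass; B first collects the distinct generation values in first-seen order (dict.fromkeys) and then builds each generation's id list by a separate filtering comprehension over the items.
import Mathlib
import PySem

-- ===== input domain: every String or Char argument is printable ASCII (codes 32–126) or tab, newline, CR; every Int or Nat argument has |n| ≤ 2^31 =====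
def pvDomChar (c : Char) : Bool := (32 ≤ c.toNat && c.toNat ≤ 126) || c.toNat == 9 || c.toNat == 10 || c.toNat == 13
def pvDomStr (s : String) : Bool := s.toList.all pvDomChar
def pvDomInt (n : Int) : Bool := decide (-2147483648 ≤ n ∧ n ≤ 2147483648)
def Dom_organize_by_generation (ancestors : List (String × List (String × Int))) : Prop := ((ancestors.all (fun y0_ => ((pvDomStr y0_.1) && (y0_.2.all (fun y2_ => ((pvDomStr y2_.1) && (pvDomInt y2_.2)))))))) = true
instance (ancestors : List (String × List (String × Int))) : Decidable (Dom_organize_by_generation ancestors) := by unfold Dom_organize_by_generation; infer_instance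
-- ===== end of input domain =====

-- B replaces A's one-pass dict bucketing by "distinct generations, then one filter per generation";
-- same return value (same key order and per-key id order), no speed claim.

-- ===== PORT A =====
def organize_by_generation (ancestors : List (String × List (String × Int))) : List (Int × List String) :=
  (ancestors.foldl (fun generations p =>
      match (PySem.Dict.ofList p.2).get? "generation" with
      | none => generations  -- KeyError in Python; excluded by Pre_
      | some gen =>
        let generations :=
          if generations.contains gen then generations else generations.insert gen []
        generations.modify gen [] (fun l => l ++ [p.1]))
    PySem.Dict.empty).items

-- ===== PORT B =====
def organize_by_generation_alt (ancestors : List (String × List (String × Int))) : List (Int × List String) :=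
  let gens := PySem.Set.ofList
    (ancestors.filterMap (fun p => (PySem.Dict.ofList p.2).get? "generation"))
  gens.map (fun g =>
    (g, (ancestors.filter (fun p => (PySem.Dict.ofList p.2).get? "generation" == some g)).map Prod.fst))

-- ===== PRECONDITION & SPEC =====
-- Pre_ excludes exactly the inputs where some info dict lacks the 'generation' key (Python A raises KeyError there).
def Pre_organize_by_generation (ancestors : List (String × List (String × Int))) : Prop :=
  ∀ p ∈ ancestors, ((PySem.Dict.ofList p.2).get? "generation").isSome = true
instance (ancestors : List (String × List (String × Int))) : Decidable (Pre_organize_by_generation ancestors) := by unfold Pre_organize_by_generation; infer_instance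

def pvWitness_organize_by_generation : (List (String × List (String × Int))) :=
  [("bee1", [("generation", 2)]), ("bee2", [("generation", 1)]), ("bee3", [("generation", 2)])]

def Spec_organize_by_generation (ancestors : List (String × List (String × Int))) (out : List (Int × List String)) : Prop := out = organize_by_generation_alt ancestors
instance (ancestors : List (String × List (String × Int))) (out : List (Int × List String)) : Decidable (Spec_organize_by_generation ancestors out) := by unfold Spec_organize_by_generation; infer_instance

-- ===== CLAIM (what is proved, stated in full; the proofs are below) =====
def Claim_equal_organize_by_generation : Prop := ∀ (ancestors : List (String × List (String × Int))), Dom_organize_by_generation ancestors → Pre_organize_by_generation ancestors → Spec_organize_by_generation ancestors (organize_by_generation ancestors)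

-- ===== LEMMAS AND PROOFS =====

-- generation value of an entry (proof-only abbreviation; under Pre_ it is the looked-up value)
def genOf (p : String × List (String × Int)) : Int :=
  ((PySem.Dict.ofList p.2).get? "generation").getD 0

-- inserting a key twice when it was absent = inserting once
theorem insert_insert_of_not_contains (d : PySem.Dict Int (List String)) (g : Int)
    (v w : List String) (hfalse : d.contains g = false) :
    (d.insert g v).insert g w = d.insert g w := by
  have hne : ∀ p ∈ d.items, (p.1 == g) = false := by
    intro p hp
    have h2 := hfalse
    simp only [PySem.Dict.contains, List.any_eq_false] at h2
    simpa using h2 p hp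
  apply PySem.Dict.ext
  rw [PySem.Dict.items_insert_of_not_contains _ _ hfalse]
  have hc : (PySem.Dict.mk (d.items ++ [(g, v)])).contains g = true := by
    simp [PySem.Dict.contains]
  rw [show d.insert g v = PySem.Dict.mk (d.items ++ [(g, v)]) by
        apply PySem.Dict.ext; rw [PySem.Dict.items_insert_of_not_contains _ _ hfalse]]
  rw [PySem.Dict.items_insert_of_contains _ _ hc]
  simp only [List.map_append, List.map_cons, List.map_nil, BEq.rfl, if_true]
  congr 1
  conv_rhs => rw [← List.map_id d.items]
  apply List.map_congr_left
  intro p hp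
  simp [hne p hp]

-- A's guarded step (setdefault-then-append) equals a plain modify
theorem stepA_eq_modify (d : PySem.Dict Int (List String)) (g : Int) (k : String) :
    ((if d.contains g then d else d.insert g []).modify g [] (fun l => l ++ [k]))
      = d.modify g [] (fun l => l ++ [k]) := by
  by_cases h : d.contains g = true
  · simp [h]
  · have hfalse : d.contains g = false := by simpa using h
    simp only [hfalse, Bool.false_eq_true, if_false, PySem.Dict.modify,
      PySem.Dict.getD_insert_self]
    rw [PySem.Dict.getD_of_not_contains d [] hfalse]
    exact insert_insert_of_not_contains d g [] _ hfalse

-- A's fold over ancestors = modify-fold over (gen, id) pairs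
theorem foldA_eq (ancestors : List (String × List (String × Int)))
    (hPre : Pre_organize_by_generation ancestors) (d : PySem.Dict Int (List String)) :
    ancestors.foldl (fun generations p =>
      match (PySem.Dict.ofList p.2).get? "generation" with
      | none => generations
      | some gen =>
        let generations :=
          if generations.contains gen then generations else generations.insert gen []
        generations.modify gen [] (fun l => l ++ [p.1])) d
    = (ancestors.map (fun p => (genOf p, p.1))).foldl
        (fun d q => d.modify q.1 [] (fun l => l ++ [q.2])) d := by
  induction ancestors generalizing d with
  | nil => rfl
  | cons p rest ih =>
    have hp := hPre p (by simp)
    obtain ⟨g, hg⟩ := Option.isSome_iff_exists.mp hp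
    have hgen : genOf p = g := by simp [genOf, hg]
    have hrest : Pre_organize_by_generation rest := fun q hq => hPre q (by simp [hq])
    simp only [List.foldl_cons, List.map_cons, hg, hgen]
    rw [stepA_eq_modify]
    exact ih hrest _

theorem items_eq_keys_map (d : PySem.Dict Int (List String)) (h : d.keys.Nodup) :
    d.items = d.keys.map (fun k => (k, d.getD k [])) := by
  have hk : d.keys.map (fun k => (k, d.getD k []))
      = d.items.map (fun q => (q.1, d.getD q.1 [])) := by
    simp [PySem.Dict.keys, List.map_map]
  rw [hk]
  conv_lhs => rw [← List.map_id d.items]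
  apply List.map_congr_left
  intro q hq
  have : d.getD q.1 [] = q.2 :=
    PySem.Dict.getD_of_mem_items _ (by simpa using hq) h []
  simp [this]

-- under Pre_, B's filterMap of lookups is the map of generation values
theorem filterMap_eq_map_genOf (ancestors : List (String × List (String × Int)))
    (hPre : Pre_organize_by_generation ancestors) :
    ancestors.filterMap (fun p => (PySem.Dict.ofList p.2).get? "generation")
      = ancestors.map genOf := by
  induction ancestors with
  | nil => rfl
  | cons p rest ih =>
    have hp := hPre p (by simp)
    obtain ⟨g, hg⟩ := Option.isSome_iff_exists.mp hp
    have hrest : Pre_organize_by_generation rest := fun q hq => hPre q (by simp [hq])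
    simp [hg, genOf, ih hrest]

-- under Pre_, B's per-generation filter matches the pair-list filter
theorem filter_pairs_eq (ancestors : List (String × List (String × Int)))
    (hPre : Pre_organize_by_generation ancestors) (g : Int) :
    ((ancestors.map (fun p => (genOf p, p.1))).filter (fun q => q.1 == g)).map (fun q => q.2)
      = (ancestors.filter (fun p => (PySem.Dict.ofList p.2).get? "generation" == some g)).map Prod.fst := by
  induction ancestors with
  | nil => rfl
  | cons p rest ih =>
    have hp := hPre p (by simp)
    obtain ⟨gp, hg⟩ := Option.isSome_iff_exists.mp hp
    have hgen : genOf p = gp := by simp [genOf, hg]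
    have hrest : Pre_organize_by_generation rest := fun q hq => hPre q (by simp [hq])
    by_cases hcase : gp = g
    · simp [hg, hgen, hcase, ih hrest]
    · simp [hg, hgen, hcase, ih hrest]

-- ===== VERDICT (by name: the statement is the Claim_ definition above) =====
theorem organize_by_generation_spec : Claim_equal_organize_by_generation := by
  intro ancestors _hDom hPre
  unfold Spec_organize_by_generation organize_by_generation organize_by_generation_alt
  rw [foldA_eq ancestors hPre]
  set l := ancestors.map (fun p => (genOf p, p.1)) with hl
  have hnodup : ((l.foldl (fun d q => d.modify q.1 [] (fun s => s ++ [q.2]))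
      PySem.Dict.empty).keys).Nodup := by
    apply PySem.Dict.nodup_keys_foldl_modify_key
    simp
  rw [items_eq_keys_map _ hnodup]
  have hkeys : (l.foldl (fun d q => d.modify q.1 [] (fun s => s ++ [q.2]))
      PySem.Dict.empty).keys = PySem.Set.ofList (ancestors.map genOf) := by
    rw [PySem.Dict.keys_foldl_modify_key]
    simp [hl, List.map_map, PySem.Set.update_nil_left, PySem.Dict.keys_empty]
    rfl
  rw [hkeys, filterMap_eq_map_genOf ancestors hPre]
  apply List.map_congr_left
  intro g _hg
  have hget : (l.foldl (fun d q => d.modify q.1 [] (fun s => s ++ [q.2]))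
      PySem.Dict.empty).getD g [] = (l.filter (fun q => q.1 == g)).map (fun q => q.2) := by
    rw [PySem.Dict.getD_foldl_modify_append]
    simp
  rw [hget, hl, filter_pairs_eq ancestors hPre g]
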